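-- pv_equiv track=rewrite | github.com/vinayakrajvardhan/Python-logic-building-durgasoft | Folder 1/42 x-o.py | count_xo
-- ===== SOURCE A (Python) =====
-- def count_xo(word:str):
--     word_x = []
--     word_o = []
--     for i in word:
--         if i == 'o':
--             word_o.append(i)
--         elif i == 'x':
--             word_x.append(i)
--     return word_o,word_x,len(word_o) == len(word_x)
-- ===== SOURCE B (Python) =====
-- def count_xo(word: str):
--     n_o = word.count('o')
--     n_x = word.count('x')
--     return ['o'] * n_o, ['x'] * n_x, n_o == n_x
-- ===== Notes on version B (the rewrite author's own statement) =====
-- stated objective: faster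
-- what changed: Replaces the accumulating per-character scan with branches by a count-then-construct decomposition: str.count for each letter, lists built by repetition, equality on the counts.
import Mathlib
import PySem

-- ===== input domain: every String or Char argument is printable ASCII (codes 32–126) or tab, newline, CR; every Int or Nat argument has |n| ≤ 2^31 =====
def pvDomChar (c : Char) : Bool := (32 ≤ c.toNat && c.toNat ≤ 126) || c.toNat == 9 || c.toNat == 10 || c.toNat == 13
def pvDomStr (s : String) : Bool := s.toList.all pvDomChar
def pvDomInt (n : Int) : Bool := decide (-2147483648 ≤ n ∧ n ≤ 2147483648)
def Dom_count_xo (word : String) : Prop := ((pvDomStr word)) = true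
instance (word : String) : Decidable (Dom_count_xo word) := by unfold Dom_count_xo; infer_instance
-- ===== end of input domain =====

-- B replaces A's accumulating per-character scan by count-then-construct (str.count, then replicated lists); same values, simpler shape.

-- ===== PORT A =====
-- for i in word: if i == 'o': word_o.append(i) elif i == 'x': word_x.append(i)
def count_xo (word : String) : List String × List String × Bool :=
  let p := word.toList.foldl
    (fun (s : List String × List String) i =>
      if i == 'o' then (s.1, s.2 ++ [String.ofList [i]])
      else if i == 'x' then (s.1 ++ [String.ofList [i]], s.2)
      else s)
    ([], [])
  (p.2, p.1, p.2.length == p.1.length)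

-- ===== PORT B =====
-- n_o = word.count('o'); n_x = word.count('x'); return ['o']*n_o, ['x']*n_x, n_o == n_x
def count_xo_alt (word : String) : List String × List String × Bool :=
  let no := PySem.Str.count word "o"
  let nx := PySem.Str.count word "x"
  (List.replicate no "o", List.replicate nx "x", no == nx)

-- ===== PRECONDITION & SPEC =====
def Spec_count_xo (word : String) (out : List String × List String × Bool) : Prop := out = count_xo_alt word
instance (word : String) (out : List String × List String × Bool) : Decidable (Spec_count_xo word out) := by unfold Spec_count_xo; infer_instance

-- ===== CLAIM (what is proved, stated in full; the proofs are below) =====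
def Claim_equal_count_xo : Prop := ∀ (word : String), Dom_count_xo word → Spec_count_xo word (count_xo word)

-- ===== LEMMAS AND PROOFS =====

theorem count_go_single (c : Char) :
    ∀ (fuel : Nat) (l : List Char) (acc : Nat), l.length ≤ fuel →
      PySem.Chars.count.go [c] fuel l acc = acc + l.count c := by
  intro fuel
  induction fuel with
  | zero =>
    intro l acc h
    cases l with
    | nil => simp [PySem.Chars.count.go]
    | cons a t => simp at h
  | succ n ih =>
    intro l acc h
    cases l with
    | nil => simp [PySem.Chars.count.go]
    | cons a t =>
      simp only [PySem.Chars.count.go]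
      by_cases hc : a = c
      · subst hc
        have hp : List.isPrefixOf [a] (a :: t) = true := by
          simp [List.isPrefixOf]
        simp only [hp, if_pos rfl]
        rw [show List.drop (List.length [a]) (a :: t) = t by simp]
        rw [ih t (acc + 1) (by simpa using Nat.le_of_succ_le_succ h)]
        simp [List.count_cons]
        omega
      · have hp : List.isPrefixOf [c] (a :: t) = false := by
          simp [List.isPrefixOf]
          intro hh; exact absurd hh.symm hc
        simp only [hp]
        simp only [Bool.false_eq_true, if_false]
        rw [ih t acc (by simpa using Nat.le_of_succ_le_succ h)]
        simp [List.count_cons, hc]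

theorem count_single (s : List Char) (c : Char) :
    PySem.Chars.count s [c] = s.count c := by
  have h := count_go_single c s.length s 0 le_rfl
  simp only [PySem.Chars.count, List.isEmpty_cons, Bool.false_eq_true, if_false]
  simpa using h

theorem count_xo_loop (l : List Char) (wx wo : List String) :
    l.foldl
      (fun (s : List String × List String) i =>
        if i == 'o' then (s.1, s.2 ++ [String.ofList [i]])
        else if i == 'x' then (s.1 ++ [String.ofList [i]], s.2)
        else s)
      (wx, wo)
    = (wx ++ List.replicate (l.count 'x') "x",
       wo ++ List.replicate (l.count 'o') "o") := by
  induction l generalizing wx wo with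
  | nil => simp
  | cons a t ih =>
    simp only [List.foldl_cons]
    by_cases ho : a = 'o'
    · subst ho
      simp only [beq_self_eq_true, if_pos rfl]
      rw [ih]
      simp [show String.ofList ['o'] = "o" from rfl, List.count_cons]
      rw [List.replicate_succ]
    · by_cases hx : a = 'x'
      · subst hx
        have : ('x' == 'o') = false := by decide
        simp only [this, Bool.false_eq_true, if_false, beq_self_eq_true, if_pos rfl]
        rw [ih]
        simp [show String.ofList ['x'] = "x" from rfl, List.count_cons]
        rw [List.replicate_succ]
      · have h1 : (a == 'o') = false := by simp [ho]
        have h2 : (a == 'x') = false := by simp [hx]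
        simp only [h1, h2, Bool.false_eq_true, if_false]
        rw [ih]
        simp [List.count_cons, ho, hx]

-- ===== VERDICT (by name: the statement is the Claim_ definition above) =====
theorem count_xo_spec : Claim_equal_count_xo := by
  intro word _
  unfold Spec_count_xo count_xo count_xo_alt
  rw [count_xo_loop]
  simp [PySem.Str.count_eq, count_single, Nat.beq_eq]
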